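-- pv_equiv track=rewrite | github.com/flashman/code-samples | benchling/q4/q4.py | n_similar_v1
-- ===== SOURCE A (Python) =====
-- def n_similar_v1(ref: str, seqs: list[str], dist=3) -> bool:
--     """
--     Given a String reference and a list of strings candidates, compute the number of candidate
--     sequences that are similar to the reference sequence.
--
--     Two strings are similar if any rotation of the strings are within 3 substitutions of each
--     other.
--
--     Examples:
--
--     GAAAAAA and GAAATTT are similar because you could replace the last 3 A's with Ts to get
--     from the first to the second
--
--     GAAAAAA and AAATTTG are similar because you could replace the last 3 A's with Ts and
--     rotate one character to the left to get from the first string to the second string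
--
--     GAAAAAA and GAATTTT are not similar because you need to make at least 4 substitutions to
--     get from the first string to the second string.
--
--     Example Input:
--
--     reference: GAAAAAA
--     candidates: [GAAATTT, AAATTTG, GAATTTT]
--
--     Output:
--     2
--     """
--
--     n = 0
--     for seq in seqs:
--         if len(seq) != len(ref):
--             continue
--         for i in range(len(seq)):
--             rot = seq[i:] + seq[:i]
--             d = sum(s != r for s, r in zip(rot, ref))
--             if d <= dist:
--                 n += 1
--                 break
--     return n
-- ===== SOURCE B (Python) =====
-- def n_similar_v1(ref: str, seqs: list[str], dist=3) -> bool: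
--     # Cyclic cross-correlation via a positions-by-character index of ref:
--     # for each candidate, one counting pass fills matches[i] = number of
--     # positions at which rotation i of the candidate agrees with ref;
--     # the candidate is similar iff some rotation has >= len(ref) - dist matches.
--     L = len(ref)
--     pos = {}
--     for j, c in enumerate(ref):
--         pos.setdefault(c, []).append(j)
--     n = 0
--     for seq in seqs:
--         if len(seq) != L:
--             continue
--         matches = [0] * L
--         for k, c in enumerate(seq):
--             for j in pos.get(c, ()):
--                 matches[(k - j) % L] += 1
--         if matches and max(matches) >= L - dist:
--             n += 1
--     return n
-- ===== Notes on version B (the rewrite author's own statement) =====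
-- stated objective: alternative
-- what changed: Instead of materializing every rotation of each candidate and counting mismatches with an early break, B builds a positions-by-character index of ref once and, per candidate, fills the cyclic cross-correlation array matches[i] = agreements of rotation i in a single counting pass over equal-character pairs, then compares max(matches) with len(ref) - dist.
import Mathlib
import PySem

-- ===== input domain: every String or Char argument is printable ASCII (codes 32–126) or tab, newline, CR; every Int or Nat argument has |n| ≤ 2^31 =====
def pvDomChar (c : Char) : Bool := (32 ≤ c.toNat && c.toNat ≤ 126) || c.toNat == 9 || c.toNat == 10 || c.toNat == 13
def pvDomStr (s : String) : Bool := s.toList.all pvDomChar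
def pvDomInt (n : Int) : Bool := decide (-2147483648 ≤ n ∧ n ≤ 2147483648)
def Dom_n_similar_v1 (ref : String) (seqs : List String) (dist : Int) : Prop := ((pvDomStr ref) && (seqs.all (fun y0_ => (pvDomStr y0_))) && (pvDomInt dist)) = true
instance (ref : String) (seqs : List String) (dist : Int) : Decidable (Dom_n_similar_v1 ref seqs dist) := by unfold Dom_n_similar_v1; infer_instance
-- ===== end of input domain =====

-- B replaces A's per-candidate try-every-rotation scan (build each rotated string, count
-- mismatches) by one counting pass per candidate that fills the cyclic cross-correlation
-- array of per-rotation match counts via a positions-by-character index of ref built once;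
-- same return value on every input (a different algorithm, not claimed faster).

-- ===== PORT A =====
-- for i in range(len(seq)): rot = seq[i:] + seq[:i]; d = sum(s != r for s, r in zip(rot, ref));
-- if d <= dist: count it, break.  (strings handled as their character lists; slicing via PySem.List.slice)
def aLoop (s r : List Char) (dist : Int) : List Int → Bool
  | [] => false
  | i :: rest =>
    let rot := PySem.List.slice s (some i) none ++ PySem.List.slice s none (some i)
    let d : Int := ((rot.zip r).map (fun p => if p.1 ≠ p.2 then (1 : Int) else 0)).sum
    if d ≤ dist then true else aLoop s r dist rest

def n_similar_v1 (ref : String) (seqs : List String) (dist : Int) : Int :=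
  seqs.foldl
    (fun n seq =>
      if PySem.Str.len seq ≠ PySem.Str.len ref then n
      else if aLoop seq.toList ref.toList dist (PySem.List.pyRange 0 (PySem.Str.len seq) 1) then n + 1
      else n)
    0

-- ===== PORT B =====
-- pos = {}; for j, c in enumerate(ref): pos.setdefault(c, []).append(j)
-- (the setdefault-then-append pair is exactly 'modify c [] (· ++ [j])' on the functional Dict)
def posOf (r : List Char) : PySem.Dict Char (List Int) :=
  (PySem.List.enumerate r 0).foldl (fun d p => d.modify p.2 [] (· ++ [p.1])) PySem.Dict.empty

-- matches[(k - j) % L] += 1  (the index is nonnegative and < len(matches) whenever the loop body runs)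
def bBump (mat : List Int) (idx : Int) : List Int :=
  PySem.List.pySetD mat idx (PySem.List.pyGetD mat idx 0 + 1)

-- matches = [0]*L; for k, c in enumerate(seq): for j in pos.get(c, ()): matches[(k - j) % L] += 1
def bMatches (L : Int) (pos : PySem.Dict Char (List Int)) (s : List Char) : List Int :=
  (PySem.List.enumerate s 0).foldl
    (fun mat p => (pos.getD p.2 []).foldl (fun m j => bBump m (PySem.Int.mod (p.1 - j) L)) mat)
    (List.replicate L.toNat 0)

def n_similar_v1_alt (ref : String) (seqs : List String) (dist : Int) : Int :=
  let L := PySem.Str.len ref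
  let pos := posOf ref.toList
  seqs.foldl
    (fun n seq =>
      if PySem.Str.len seq ≠ L then n
      else
        -- if matches and max(matches) >= L - dist: n += 1  (max? is none exactly when matches == [])
        match PySem.List.max? (bMatches L pos seq.toList) (fun x => x) with
        | some m => if L - dist ≤ m then n + 1 else n
        | none => n)
    0

-- ===== PRECONDITION & SPEC =====
def Spec_n_similar_v1 (ref : String) (seqs : List String) (dist : Int) (out : Int) : Prop := out = n_similar_v1_alt ref seqs dist
instance (ref : String) (seqs : List String) (dist : Int) (out : Int) : Decidable (Spec_n_similar_v1 ref seqs dist out) := by unfold Spec_n_similar_v1; infer_instance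

-- ===== CLAIM (what is proved, stated in full; the proofs are below) =====
def Claim_equal_n_similar_v1 : Prop := ∀ (ref : String) (seqs : List String) (dist : Int), Dom_n_similar_v1 ref seqs dist → Spec_n_similar_v1 ref seqs dist (n_similar_v1 ref seqs dist)

-- ===== LEMMAS AND PROOFS =====

theorem countP_range_sum (n : ℕ) (p : ℕ → Bool) :
    (List.range n).countP p = ∑ k ∈ Finset.range n, if p k then 1 else 0 := by
  induction n with
  | zero => simp
  | succ n ih => rw [List.range_succ, List.countP_append, Finset.sum_range_succ, ih]; simp [List.countP_cons]

theorem sum_map_range {M : Type} [AddCommMonoid M] (n : ℕ) (f : ℕ → M) :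
    ((List.range n).map f).sum = ∑ k ∈ Finset.range n, f k := by
  induction n with
  | zero => simp
  | succ n ih => rw [List.range_succ, Finset.sum_range_succ, List.map_append, List.sum_append, ih]; simp

theorem enumerate_eq_map_range (xs : List Char) :
    PySem.List.enumerate xs 0 = (List.range xs.length).map (fun k : ℕ => ((k : Int), xs.getD k ' ')) := by
  apply List.ext_getElem
  · simp [PySem.List.length_enumerate]
  · intro i h1 h2
    have h3 : i < xs.length := by simpa [PySem.List.length_enumerate] using h1
    simp [PySem.List.getElem_enumerate, List.getElem?_eq_getElem h3]

theorem foldl_flat {α β γ : Type} (l : List α) (g : α → List β) (f : γ → β → γ) (init : γ) :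
    l.foldl (fun acc x => (g x).foldl f acc) init = (l.flatMap g).foldl f init := by
  induction l generalizing init with
  | nil => simp
  | cons x t ih => simp [List.flatMap_cons, List.foldl_append, ih]

theorem count_flatMap {α β : Type} [BEq β] (l : List α) (g : α → List β) (a : β) :
    (l.flatMap g).count a = (l.map (fun x => (g x).count a)).sum := by
  induction l with
  | nil => simp
  | cons x t ih => simp [List.flatMap_cons, List.count_append, ih]

theorem pos_getD (r : List Char) (c : Char) :
    (posOf r).getD c []
      = ((List.range r.length).filter (fun j => r.getD j ' ' = c)).map (fun j : ℕ => (j : Int)) := by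
  rw [posOf, enumerate_eq_map_range, List.foldl_map]
  have h := PySem.Dict.getD_foldl_modify_append
    (l := (List.range r.length).map (fun j : ℕ => (r.getD j ' ', (j : Int))))
    (d := (PySem.Dict.empty : PySem.Dict Char (List Int))) (c := c)
  rw [List.foldl_map] at h
  simp only at h
  rw [h]
  simp only [PySem.Dict.getD_empty, List.filter_map, Function.comp_def, List.map_map, List.nil_append]
  congr 1

theorem bBump_length (mat : List Int) (u : Int) : (bBump mat u).length = mat.length := by
  simp [bBump, PySem.List.length_pySetD]

theorem bBump_getD (mat : List Int) (u : Int) (hu : 0 ≤ u) (hu2 : u < (mat.length : Int))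
    (i : ℕ) :
    (bBump mat u).getD i 0 = mat.getD i 0 + (if u = (i : Int) then 1 else 0) := by
  have h1 : u.toNat < mat.length := by omega
  unfold bBump
  rw [PySem.List.pySetD_of_nonneg mat _ hu, PySem.List.pyGetD_of_nonneg mat 0 hu]
  by_cases hi : i < mat.length
  · rw [List.getD_eq_getElem _ 0 (by simpa using hi), List.getD_eq_getElem _ 0 hi, List.getElem_set]
    by_cases h : u = (i : Int)
    · have h4 : u.toNat = i := by omega
      simp [h4, h, List.getElem?_eq_getElem hi]
    · have : u.toNat ≠ i := by omega
      simp [this, h]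
  · have h2 : u ≠ (i : Int) := by omega
    rw [List.getD_eq_default _ 0 (by simpa using Nat.le_of_not_lt hi),
        List.getD_eq_default _ 0 (Nat.le_of_not_lt hi)]
    simp [h2]

theorem foldl_bump_length (us : List Int) (mat : List Int) :
    (us.foldl bBump mat).length = mat.length := by
  induction us generalizing mat with
  | nil => rfl
  | cons u t ih => rw [List.foldl_cons, ih, bBump_length]

theorem foldl_bump_getD (us : List Int) (mat : List Int)
    (hus : ∀ u ∈ us, 0 ≤ u ∧ u < (mat.length : Int)) (i : ℕ) :
    (us.foldl bBump mat).getD i 0 = mat.getD i 0 + (us.count (i : Int) : Int) := by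
  induction us generalizing mat with
  | nil => simp
  | cons u t ih =>
    have hu := hus u (List.mem_cons_self ..)
    rw [List.foldl_cons]
    have hlen : (bBump mat u).length = mat.length := bBump_length mat u
    rw [ih (bBump mat u) (fun v hv => by rw [hlen]; exact hus v (List.mem_cons_of_mem _ hv))]
    rw [bBump_getD mat u hu.1 hu.2 i, List.count_cons]
    by_cases h : u = (i : Int) <;> simp [h] <;> push_cast <;> ring

def mCnt (s r : List Char) (i : ℕ) : ℕ :=
  (List.range r.length).countP (fun j => s.getD ((i + j) % r.length) ' ' = r.getD j ' ')

theorem rot_getD (s r : List Char) (h : s.length = r.length) (i j : ℕ)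
    (hi : i < r.length) (hj : j < r.length) :
    (s.drop i ++ s.take i).getD j ' ' = s.getD ((i + j) % r.length) ' ' := by
  have hds : (s.drop i).length = r.length - i := by simp [h]
  have hts : (s.take i).length = i := by simp [h]; omega
  by_cases hc : j < r.length - i
  · have hmod : (i + j) % r.length = i + j := Nat.mod_eq_of_lt (by omega)
    rw [List.getD_eq_getElem _ ' ' (by simp [hds, hts]; omega), List.getElem_append_left (by omega),
        List.getElem_drop, hmod, List.getD_eq_getElem _ ' ' (by omega)]
  · have hmod : (i + j) % r.length = j - (r.length - i) := by
      have h1 : i + j - r.length = j - (r.length - i) := by omega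
      rw [Nat.mod_eq_sub_mod (by omega), Nat.mod_eq_of_lt (by omega), h1]
    rw [List.getD_eq_getElem _ ' ' (by simp [hds, hts]; omega), List.getElem_append_right (by omega),
        List.getElem_take, hmod, List.getD_eq_getElem _ ' ' (by omega)]
    congr 1
    omega

theorem zip_map_range (xs ys : List Char) (h : xs.length = ys.length) :
    xs.zip ys = (List.range ys.length).map (fun j : ℕ => (xs.getD j ' ', ys.getD j ' ')) := by
  apply List.ext_getElem
  · simp [h]
  · intro j h1 h2
    have hj : j < ys.length := by simpa using h2
    simp [List.getElem_zip, List.getElem?_eq_getElem (show j < xs.length by omega),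
      List.getElem?_eq_getElem hj]

theorem dOf_eq (s r : List Char) (h : s.length = r.length) (i : ℕ) (hi : i < r.length) :
    (((PySem.List.slice s (some (i : Int)) none ++ PySem.List.slice s none (some (i : Int))).zip r).map
        (fun p => if p.1 ≠ p.2 then (1 : Int) else 0)).sum
      = (r.length : Int) - (mCnt s r i : Int) := by
  rw [PySem.List.slice_from_natCast, PySem.List.slice_to_natCast]
  rw [zip_map_range _ _ (by simp [h]; omega), List.map_map, sum_map_range]
  have hterm : ∀ j ∈ Finset.range r.length,
      ((fun p : Char × Char => if p.1 ≠ p.2 then (1 : Int) else 0) ∘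
        (fun j : ℕ => ((s.drop i ++ s.take i).getD j ' ', r.getD j ' '))) j
      = 1 - (if s.getD ((i + j) % r.length) ' ' = r.getD j ' ' then (1 : Int) else 0) := by
    intro j hj
    rw [Finset.mem_range] at hj
    simp only [Function.comp_apply, rot_getD s r h i j hi hj, ne_eq]
    split_ifs <;> ring
  rw [Finset.sum_congr rfl hterm, Finset.sum_sub_distrib]
  have : (mCnt s r i : Int) = ∑ j ∈ Finset.range r.length,
      (if s.getD ((i + j) % r.length) ' ' = r.getD j ' ' then (1 : Int) else 0) := by
    rw [mCnt, countP_range_sum]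
    push_cast
    apply Finset.sum_congr rfl
    intro j _
    split_ifs with hx <;> simp_all
  rw [← this]
  simp

theorem key_mod (L i j k : ℕ) (hL : 0 < L) (hi : i < L) (hj : j < L) (hk : k < L) :
    PySem.Int.mod ((k : Int) - (j : Int)) (L : Int) = (i : Int) ↔ k = (i + j) % L := by
  rw [PySem.Int.mod_eq_emod_of_pos (by exact_mod_cast hL)]
  have h4 : ((i : Int) + j) % L = (((i + j) % L : ℕ) : Int) := by push_cast; rfl
  constructor
  · intro h
    have h1 : ((k : Int) - j) % (L : Int) = (i : Int) % L := by
      rw [h, Int.emod_eq_of_lt (by positivity) (by exact_mod_cast hi)]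
    have h2 : (k : Int) % L = ((i : Int) + j) % L := by
      have := Int.ModEq.add_right (j : Int) (h1 : Int.ModEq _ _ _)
      simpa [Int.ModEq, sub_add_cancel] using this
    have h3 : (k : Int) % L = (k : Int) := Int.emod_eq_of_lt (by positivity) (by exact_mod_cast hk)
    omega
  · intro h
    subst h
    have h2 : ((((i + j) % L : ℕ) : Int) - j) % L = ((i : Int) + j - j) % L := by
      have hm : (((i + j) % L : ℕ) : Int) % L = ((i : Int) + j) % L := by
        rw [Int.emod_eq_of_lt (by positivity) (by exact_mod_cast Nat.mod_lt (i + j) hL)]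
        exact h4.symm
      have := Int.ModEq.sub_right (j : Int) (hm : Int.ModEq _ _ _)
      simpa using this
    rw [h2]
    simp only [add_sub_cancel_right]
    exact Int.emod_eq_of_lt (by positivity) (by exact_mod_cast hi)

theorem updates_count (r s : List Char) (h : s.length = r.length) (hL : 0 < r.length)
    (i : ℕ) (hi : i < r.length) :
    ((PySem.List.enumerate s 0).flatMap
        (fun p => ((posOf r).getD p.2 []).map (fun j => PySem.Int.mod (p.1 - j) (r.length : Int)))).count (i : Int)
      = mCnt s r i := by
  rw [count_flatMap, enumerate_eq_map_range, List.map_map, h, sum_map_range]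
  simp only [Function.comp_apply]
  have hinner : ∀ k ∈ Finset.range r.length,
      (((posOf r).getD (s.getD k ' ') []).map (fun j => PySem.Int.mod ((k : Int) - j) (r.length : Int))).count (i : Int)
      = ∑ j ∈ Finset.range r.length,
          if (PySem.Int.mod ((k : Int) - (j : Int)) (r.length : Int) = (i : Int) ∧ r.getD j ' ' = s.getD k ' ')
          then 1 else 0 := by
    intro k hk
    rw [pos_getD, List.map_map, List.count_eq_countP, List.countP_map, List.countP_filter,
        countP_range_sum]
    apply Finset.sum_congr rfl
    intro j _
    simp only [Function.comp_apply]
    split_ifs with h1 h2 h2 <;> simp_all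
  rw [Finset.sum_congr rfl hinner, Finset.sum_comm]
  have hcollapse : ∀ j ∈ Finset.range r.length,
      (∑ k ∈ Finset.range r.length,
        if (PySem.Int.mod ((k : Int) - (j : Int)) (r.length : Int) = (i : Int) ∧ r.getD j ' ' = s.getD k ' ')
        then 1 else 0)
      = if s.getD ((i + j) % r.length) ' ' = r.getD j ' ' then 1 else 0 := by
    intro j hj
    rw [Finset.mem_range] at hj
    rw [Finset.sum_eq_single ((i + j) % r.length)]
    · have hk0 : (i + j) % r.length < r.length := Nat.mod_lt _ hL
      have hiff : (PySem.Int.mod (((((i + j) % r.length : ℕ)) : Int) - (j : Int)) (r.length : Int) = (i : Int)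
            ∧ r.getD j ' ' = s.getD ((i + j) % r.length) ' ')
          ↔ s.getD ((i + j) % r.length) ' ' = r.getD j ' ' := by
        constructor
        · rintro ⟨-, h2⟩; exact h2.symm
        · intro h2
          exact ⟨(key_mod r.length i j _ hL hi hj hk0).2 rfl, h2.symm⟩
      rw [if_congr hiff rfl rfl]
    · intro k hk hne
      rw [Finset.mem_range] at hk
      rw [if_neg]
      rintro ⟨h1, -⟩
      exact hne ((key_mod r.length i j k hL hi hj hk).1 h1)
    · intro hmem
      exact absurd (Finset.mem_range.2 (Nat.mod_lt _ hL)) hmem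
  rw [Finset.sum_congr rfl hcollapse, mCnt, countP_range_sum]
  simp

theorem aLoop_iff (s r : List Char) (dist : Int) (l : List Int) :
    aLoop s r dist l = true ↔ ∃ i ∈ l,
      (((PySem.List.slice s (some i) none ++ PySem.List.slice s none (some i)).zip r).map
        (fun p => if p.1 ≠ p.2 then (1 : Int) else 0)).sum ≤ dist := by
  induction l with
  | nil => simp [aLoop]
  | cons x t ih =>
    rw [aLoop]
    split_ifs with hx
    · simp only [true_iff]
      exact ⟨x, List.mem_cons_self .., hx⟩
    · rw [ih]
      constructor
      · rintro ⟨i, hi, hd⟩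
        exact ⟨i, List.mem_cons_of_mem _ hi, hd⟩
      · rintro ⟨i, hi, hd⟩
        rcases List.mem_cons.1 hi with rfl | hi
        · exact absurd hd hx
        · exact ⟨i, hi, hd⟩

theorem foldl_congr' {α β : Type} (l : List β) (f g : α → β → α) (init : α)
    (h : ∀ a b, f a b = g a b) : l.foldl f init = l.foldl g init := by
  induction l generalizing init with
  | nil => rfl
  | cons x t ih => rw [List.foldl_cons, List.foldl_cons, h, ih]

theorem bMatches_eq_flat (L : Int) (pos : PySem.Dict Char (List Int)) (s : List Char) :
    bMatches L pos s
      = ((PySem.List.enumerate s 0).flatMap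
          (fun p => (pos.getD p.2 []).map (fun j => PySem.Int.mod (p.1 - j) L))).foldl bBump
          (List.replicate L.toNat 0) := by
  rw [bMatches, ← foldl_flat]
  apply foldl_congr'
  intro mat p
  rw [List.foldl_map]

theorem updates_bounds (r s : List Char) (hL : 0 < r.length) (u : Int)
    (hu : u ∈ (PySem.List.enumerate s 0).flatMap
        (fun p => ((posOf r).getD p.2 []).map (fun j => PySem.Int.mod (p.1 - j) (r.length : Int)))) :
    0 ≤ u ∧ u < (r.length : Int) := by
  rw [List.mem_flatMap] at hu
  obtain ⟨p, -, hp⟩ := hu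
  rw [List.mem_map] at hp
  obtain ⟨j, -, rfl⟩ := hp
  have hpos : (0 : Int) < (r.length : Int) := by exact_mod_cast hL
  rw [PySem.Int.mod_eq_emod_of_pos hpos]
  exact ⟨Int.emod_nonneg _ (by omega), Int.emod_lt_of_pos _ hpos⟩

theorem bMatches_length (r s : List Char) :
    (bMatches (r.length : Int) (posOf r) s).length = r.length := by
  rw [bMatches_eq_flat, foldl_bump_length]
  simp

theorem bMatches_getD (r s : List Char) (h : s.length = r.length) (hL : 0 < r.length)
    (i : ℕ) (hi : i < r.length) :
    (bMatches (r.length : Int) (posOf r) s).getD i 0 = (mCnt s r i : Int) := by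
  rw [bMatches_eq_flat, foldl_bump_getD _ _ (fun u hu => by
      simpa using updates_bounds r s hL u hu)]
  rw [List.getD_replicate 0 (by simpa using hi), updates_count r s h hL i hi]
  simp

theorem step_eq (r s : List Char) (dist : Int) (n : Int) (h : s.length = r.length) :
    (if aLoop s r dist (PySem.List.pyRange 0 (s.length : Int) 1) = true then n + 1 else n)
    = (match PySem.List.max? (bMatches (r.length : Int) (posOf r) s) (fun x => x) with
       | some m => if (r.length : Int) - dist ≤ m then n + 1 else n
       | none => n) := by
  by_cases hL : 0 < r.length
  · -- matches is nonempty, so max? is some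
    have hlen : (bMatches (r.length : Int) (posOf r) s).length = r.length := bMatches_length r s
    rcases hmax : PySem.List.max? (bMatches (r.length : Int) (posOf r) s) (fun x => x) with _ | m
    · rw [PySem.List.max?_eq_none_iff] at hmax
      rw [hmax] at hlen
      simp at hlen
      omega
    · have hmem := PySem.List.max?_mem hmax
      have hmaxx := PySem.List.max?_isMax hmax
      have hiff : aLoop s r dist (PySem.List.pyRange 0 (s.length : Int) 1) = true
          ↔ (r.length : Int) - dist ≤ m := by
        rw [aLoop_iff]
        constructor
        · rintro ⟨i, hmem', hd⟩
          rw [PySem.List.mem_pyRange_one] at hmem'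
          obtain ⟨h0, hlt⟩ := hmem'
          set iN := i.toNat with hiN
          have hieq : i = (iN : Int) := by omega
          have hiNlt : iN < r.length := by omega
          rw [hieq, dOf_eq s r h iN hiNlt] at hd
          have hx : (bMatches (r.length : Int) (posOf r) s).getD iN 0 = (mCnt s r iN : Int) :=
            bMatches_getD r s h hL iN hiNlt
          have hxm : (bMatches (r.length : Int) (posOf r) s).getD iN 0 ∈
              bMatches (r.length : Int) (posOf r) s := by
            rw [List.getD_eq_getElem _ 0 (by omega)]
            exact List.getElem_mem _
          have := hmaxx _ hxm
          rw [hx] at this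
          omega
        · intro hd
          obtain ⟨iN, hiNlt, hEl⟩ := List.mem_iff_getElem.1 hmem
          rw [hlen] at hiNlt
          have hx : (bMatches (r.length : Int) (posOf r) s).getD iN 0 = (mCnt s r iN : Int) :=
            bMatches_getD r s h hL iN hiNlt
          rw [List.getD_eq_getElem _ 0 (by omega)] at hx
          rw [hEl] at hx
          refine ⟨(iN : Int), ?_, ?_⟩
          · rw [PySem.List.mem_pyRange_one]
            constructor <;> [positivity; exact_mod_cast (h ▸ hiNlt)]
          · rw [dOf_eq s r h iN hiNlt]
            omega
      by_cases hc : (r.length : Int) - dist ≤ m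
      · rw [if_pos (hiff.2 hc)]
        simp [hc]
      · rw [if_neg (fun hh => hc (hiff.1 hh))]
        simp [hc]
  · -- empty reference: A's range is empty, B's matches list is empty
    have hL0 : r.length = 0 := by omega
    have hs0 : s.length = 0 := by omega
    have h1 : PySem.List.pyRange 0 ((s.length : Int)) 1 = [] :=
      PySem.List.pyRange_one_eq_nil (by simp [hs0])
    have h2 : bMatches (r.length : Int) (posOf r) s = [] := by
      apply List.eq_nil_of_length_eq_zero
      rw [bMatches_length]
      exact hL0
    have h3 : PySem.List.max? ([] : List Int) (fun x : Int => x) = none := by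
      rw [PySem.List.max?_eq_none_iff]
    rw [h1, h2, h3]
    simp [aLoop]

-- ===== VERDICT (by name: the statement is the Claim_ definition above) =====
theorem n_similar_v1_spec : Claim_equal_n_similar_v1 := by
  intro ref seqs dist _
  unfold Spec_n_similar_v1 n_similar_v1 n_similar_v1_alt
  apply foldl_congr'
  intro n seq
  simp only [PySem.Str.len_eq]
  by_cases hlen : seq.toList.length = ref.toList.length
  · have hne : ¬ ((seq.toList.length : Int) ≠ (ref.toList.length : Int)) := by
      simp [hlen]
    rw [if_neg hne, if_neg hne]
    exact step_eq ref.toList seq.toList dist n hlen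
  · have hne : ((seq.toList.length : Int) ≠ (ref.toList.length : Int)) := by
      exact_mod_cast hlen
    rw [if_pos hne, if_pos hne]
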